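-- pv_equiv track=rewrite | github.com/kryptocheck/SHA3_py | hash/SHA3/Keccak.py | h2b
-- ===== SOURCE A (Python) =====
-- from typing import Literal, IO
--
-- def h2b(hexstring: str
--         ) -> list[Literal[0,1]]:
--     """
--     h2b algorithm defined in Annex B.1. The conversion function from hexadecimal strings to the SHA-3 strings
--     that they represent.
--
--
--     Args:
--         hexstring:
--             hexstring to convert. Can contain spaces
--
--     Returns:
--         resulted bit array
--
--     Raises:
--         ValueError:
--             input is not proper hexstring.
--
--     """
--
--     transformation_table = {"0": [0, 0, 0, 0],
--                             "1": [1, 0, 0, 0],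
--                             "2": [0, 1, 0, 0],
--                             "3": [1, 1, 0, 0],
--                             "4": [0, 0, 1, 0],
--                             "5": [1, 0, 1, 0],
--                             "6": [0, 1, 1, 0],
--                             "7": [1, 1, 1, 0],
--                             "8": [0, 0, 0, 1],
--                             "9": [1, 0, 0, 1],
--                             "A": [0, 1, 0, 1],
--                             "B": [1, 1, 0, 1],
--                             "C": [0, 0, 1, 1],
--                             "D": [1, 0, 1, 1],
--                             "E": [0, 1, 1, 1],
--                             "F": [1, 1, 1, 1]}
--
--     bit_array: list[Literal[0,1]] = []
--     tmp_array: list[Literal[0,1]] = []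
--     if len(hexstring) % 2 != 0:
--         raise ValueError(f"Improper hexstring of length {len(hexstring)}")
--
--     for i in hexstring:
--         try:
--             tmp_array = transformation_table[i.upper()] + tmp_array
--         except KeyError:
--             raise ValueError(f"Improper character in hexstring: {i}")
--
--         if len(tmp_array) == 8:
--             bit_array += tmp_array
--             tmp_array = []
--
--     return bit_array
-- ===== SOURCE B (Python) =====
-- def _nibble(c):
--     v = "0123456789ABCDEF".find(c.upper())
--     if v < 0:
--         raise ValueError(f"Improper character in hexstring: {c}")
--     return v
--
--
-- def h2b(hexstring):
--     if len(hexstring) % 2 != 0: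
--         raise ValueError(f"Improper hexstring of length {len(hexstring)}")
--     bits = []
--     for i in range(0, len(hexstring), 2):
--         v = 16 * _nibble(hexstring[i]) + _nibble(hexstring[i + 1])
--         for _ in range(8):
--             bits.append(v % 2)
--             v //= 2
--     return bits
-- ===== Notes on version B (the rewrite author's own statement) =====
-- stated objective: alternative
-- what changed: B drops A's 4-bit lookup table and flush-at-8 tmp accumulator: it walks the string two characters at a time, forms each byte's value 16*hi+lo arithmetically from each character's position in the hex-digit alphabet, and extracts its eight bits with % 2 and //= 2.
import Mathlib
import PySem

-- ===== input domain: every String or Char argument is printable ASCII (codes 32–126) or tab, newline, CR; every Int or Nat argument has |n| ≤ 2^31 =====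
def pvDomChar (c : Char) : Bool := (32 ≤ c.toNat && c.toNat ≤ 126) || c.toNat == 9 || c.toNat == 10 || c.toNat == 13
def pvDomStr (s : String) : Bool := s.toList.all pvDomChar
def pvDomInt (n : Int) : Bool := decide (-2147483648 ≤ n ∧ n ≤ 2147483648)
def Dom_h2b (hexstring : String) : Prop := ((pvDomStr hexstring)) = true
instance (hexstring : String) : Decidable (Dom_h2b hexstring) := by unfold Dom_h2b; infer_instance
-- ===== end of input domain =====

-- B replaces A's nibble table and flush-at-8 accumulator by arithmetic: per char pair it forms
-- the byte value 16*hi+lo and extracts eight bits with % 2 / // 2 (objective: alternative).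

-- ===== PORT A =====
-- transformation_table: the Python dict's keys are 1-char strings; ported with Char keys
-- (exact: lookup key i.upper() is always a 1-char string, upper of a 1-char ASCII string = upperChar)
def h2bTable : PySem.Dict Char (List Int) :=
  PySem.Dict.ofList
    [('0', [0, 0, 0, 0]), ('1', [1, 0, 0, 0]), ('2', [0, 1, 0, 0]), ('3', [1, 1, 0, 0]),
     ('4', [0, 0, 1, 0]), ('5', [1, 0, 1, 0]), ('6', [0, 1, 1, 0]), ('7', [1, 1, 1, 0]),
     ('8', [0, 0, 0, 1]), ('9', [1, 0, 0, 1]), ('A', [0, 1, 0, 1]), ('B', [1, 1, 0, 1]),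
     ('C', [0, 0, 1, 1]), ('D', [1, 0, 1, 1]), ('E', [0, 1, 1, 1]), ('F', [1, 1, 1, 1])]

-- the 'for i in hexstring' loop; none = the ValueError raised on the KeyError
def h2bLoop (cs : List Char) (bit_array tmp_array : List Int) : Option (List Int) :=
  match cs with
  | [] => some bit_array
  | c :: rest =>
    match h2bTable.get? (PySem.Chars.upperChar c) with
    | none => none
    | some t =>
      let tmp' := t ++ tmp_array
      if tmp'.length = 8 then h2bLoop rest (bit_array ++ tmp') []
      else h2bLoop rest bit_array tmp'

-- on the raise paths (odd length / bad char) the Python raises ValueError; those inputs are outside Pre_h2b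
def h2b (hexstring : String) : List Int :=
  if hexstring.toList.length % 2 ≠ 0 then []
  else (h2bLoop hexstring.toList [] []).getD []

-- ===== PORT B =====
-- the literal "0123456789ABCDEF" that _nibble searches, as its character list
def hexDigits : List Char := ['0','1','2','3','4','5','6','7','8','9','A','B','C','D','E','F']

-- _nibble: "0123456789ABCDEF".find(c.upper()); none = the ValueError on v < 0
def nibble (c : Char) : Option Int :=
  let v := PySem.Chars.find hexDigits [PySem.Chars.upperChar c]
  if v < 0 then none else some v

-- the inner 'for _ in range(8)' bit-extraction loop (bits.append(v % 2); v //= 2)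
def bits8Loop : Nat → Int → List Int
  | 0, _ => []
  | n + 1, v => PySem.Int.mod v 2 :: bits8Loop n (PySem.Int.floordiv v 2)

-- the 'for i in range(0, len(hexstring), 2)' loop, two chars per step
def h2bAltLoop (cs : List Char) : Option (List Int) :=
  match cs with
  | [] => some []
  | [_] => none
  | c1 :: c2 :: rest =>
    match nibble c1, nibble c2 with
    | some v1, some v2 =>
      match h2bAltLoop rest with
      | some r => some (bits8Loop 8 (16 * v1 + v2) ++ r)
      | none => none
    | _, _ => none

def h2b_alt (hexstring : String) : List Int :=
  if hexstring.toList.length % 2 ≠ 0 then []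
  else (h2bAltLoop hexstring.toList).getD []

-- ===== PRECONDITION & SPEC =====
def hexChars : List Char := ['0','1','2','3','4','5','6','7','8','9','a','b','c','d','e','f','A','B','C','D','E','F']

-- Pre_ excludes exactly the inputs where A raises ValueError: odd length or a non-hex character.
def Pre_h2b (hexstring : String) : Prop :=
  hexstring.toList.length % 2 = 0 ∧ hexstring.toList.all (fun c => hexChars.contains c) = true
instance (hexstring : String) : Decidable (Pre_h2b hexstring) := by unfold Pre_h2b; infer_instance

def pvWitness_h2b : String := "0fAb"

def Spec_h2b (hexstring : String) (out : List Int) : Prop := out = h2b_alt hexstring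
instance (hexstring : String) (out : List Int) : Decidable (Spec_h2b hexstring out) := by unfold Spec_h2b; infer_instance

-- ===== CLAIM (what is proved, stated in full; the proofs are below) =====
def Claim_equal_h2b : Prop := ∀ (hexstring : String), Dom_h2b hexstring → Pre_h2b hexstring → Spec_h2b hexstring (h2b hexstring)

-- ===== LEMMAS AND PROOFS =====

-- per-char facts (A's table entry vs B's nibble value), checked over the 22 hex chars
def charOK (c : Char) : Bool :=
  match h2bTable.get? (PySem.Chars.upperChar c), nibble c with
  | some t, some v => (t.length == 4) && (t == bits8Loop 4 v) && (decide (0 ≤ v)) && (decide (v < 16))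
  | _, _ => false

theorem allCharsOK : ∀ c ∈ hexChars, charOK c = true := by
  intro c hc
  fin_cases hc <;> decide

-- the byte's eight extracted bits are the low nibble's four followed by the high nibble's four
theorem bits8_split (v1 v2 : Int) (h0 : 0 ≤ v2) (h16 : v2 < 16) :
    bits8Loop 8 (16 * v1 + v2) = bits8Loop 4 v2 ++ bits8Loop 4 v1 := by
  have hm : ∀ a : Int, PySem.Int.mod a 2 = a % 2 := fun a => PySem.Int.mod_eq_emod_of_pos (by norm_num)
  have hd : ∀ a : Int, PySem.Int.floordiv a 2 = a / 2 := fun a => PySem.Int.floordiv_eq_ediv_of_pos (by norm_num)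
  simp only [bits8Loop, hm, hd, List.cons_append, List.nil_append, List.cons.injEq, and_true]
  omega

-- one two-char step of A's loop equals one step of B's loop
theorem loop_step (c1 c2 : Char) (rest : List Char)
    (ih : rest.length % 2 = 0 → (∀ c ∈ rest, c ∈ hexChars) → ∀ bits : List Int,
      h2bLoop rest bits [] = (h2bAltLoop rest).map (fun r => bits ++ r))
    (hlen : (c1 :: c2 :: rest).length % 2 = 0)
    (hhex : ∀ c ∈ c1 :: c2 :: rest, c ∈ hexChars) (bits : List Int) :
    h2bLoop (c1 :: c2 :: rest) bits [] = (h2bAltLoop (c1 :: c2 :: rest)).map (fun r => bits ++ r) := by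
  have hOK1 := allCharsOK c1 (hhex c1 (by simp))
  have hOK2 := allCharsOK c2 (hhex c2 (by simp))
  unfold charOK at hOK1 hOK2
  cases e1 : h2bTable.get? (PySem.Chars.upperChar c1) with
  | none => rw [e1] at hOK1; simp at hOK1
  | some t1 =>
  cases e3 : nibble c1 with
  | none => rw [e1, e3] at hOK1; simp at hOK1
  | some v1 =>
  cases e2 : h2bTable.get? (PySem.Chars.upperChar c2) with
  | none => rw [e2] at hOK2; simp at hOK2
  | some t2 =>
  cases e4 : nibble c2 with
  | none => rw [e2, e4] at hOK2; simp at hOK2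
  | some v2 =>
  rw [e1, e3] at hOK1; rw [e2, e4] at hOK2
  simp only [Bool.and_eq_true, beq_iff_eq, decide_eq_true_eq] at hOK1 hOK2
  obtain ⟨⟨⟨hlen1, ht1⟩, _⟩, _⟩ := hOK1
  obtain ⟨⟨⟨hlen2, ht2⟩, hv0⟩, hv16⟩ := hOK2
  have hbits : bits8Loop 8 (16 * v1 + v2) = t2 ++ t1 := by
    rw [bits8_split v1 v2 hv0 hv16, ht1, ht2]
  have hl1 : ¬ (t1 ++ ([] : List Int)).length = 8 := by simp [hlen1]
  have hl2 : (t2 ++ (t1 ++ ([] : List Int))).length = 8 := by simp [hlen1, hlen2]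
  have hrec := ih (by simp only [List.length_cons] at hlen; omega)
    (fun c hc => hhex c (by simp [hc])) (bits ++ (t2 ++ (t1 ++ [])))
  have step1 : h2bLoop (c1 :: c2 :: rest) bits [] = h2bLoop (c2 :: rest) bits (t1 ++ []) := by
    simp only [h2bLoop, e1]
    rw [if_neg hl1]
  have step2 : h2bLoop (c2 :: rest) bits (t1 ++ []) = h2bLoop rest (bits ++ (t2 ++ (t1 ++ []))) [] := by
    simp only [h2bLoop, e2]
    rw [if_pos hl2]
  rw [step1, step2, hrec]
  simp only [h2bAltLoop, e3, e4]
  cases h2bAltLoop rest with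
  | none => simp
  | some r => simp [hbits, List.append_assoc]

theorem loop_eq (cs : List Char) : cs.length % 2 = 0 → (∀ c ∈ cs, c ∈ hexChars) →
    ∀ bits : List Int, h2bLoop cs bits [] = (h2bAltLoop cs).map (fun r => bits ++ r) := by
  induction cs using h2bAltLoop.induct with
  | case1 => intro _ _ bits; simp [h2bLoop, h2bAltLoop]
  | case2 c => intro hlen; simp at hlen
  | case3 c1 c2 rest v1 v2 _ _ r _ ih => exact loop_step c1 c2 rest ih
  | case4 c1 c2 rest v1 v2 _ _ _ ih => exact loop_step c1 c2 rest ih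
  | case5 c1 c2 rest hnone =>
    intro _ hhex _
    have hOK1 := allCharsOK c1 (hhex c1 (by simp))
    have hOK2 := allCharsOK c2 (hhex c2 (by simp))
    unfold charOK at hOK1 hOK2
    cases e3 : nibble c1 with
    | none => rw [e3] at hOK1; cases h2bTable.get? (PySem.Chars.upperChar c1) <;> simp at hOK1
    | some v1 =>
      cases e4 : nibble c2 with
      | none => rw [e4] at hOK2; cases h2bTable.get? (PySem.Chars.upperChar c2) <;> simp at hOK2
      | some v2 => exact absurd (hnone v1 v2 e3 e4) (by simp)

-- ===== VERDICT (by name: the statement is the Claim_ definition above) =====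
theorem h2b_spec : Claim_equal_h2b := by
  intro s _ hpre
  obtain ⟨hlen, hhex⟩ := hpre
  unfold Spec_h2b h2b h2b_alt
  rw [if_neg (by omega), if_neg (by omega)]
  rw [loop_eq s.toList hlen (by simpa using hhex) []]
  cases h2bAltLoop s.toList <;> simp
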